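-- pv_equiv track=rewrite | github.com/ad-astra26/titan-public | scripts/migrate_silent_swallow_pattern_c.py | _slugify_for_key
-- ===== SOURCE A (Python) =====
-- def _slugify_for_key(prefix_str: str, fallback: str) -> str:
--     """Derive a stable, short suffix for the swallow_warn key from the
--     log prefix. e.g. '[KnowledgeGraph] Entity insert error for ...' →
--     'entity_insert_error'."""
--     # Strip leading [Tag] if present
--     s = prefix_str.strip()
--     if s.startswith("[") and "]" in s:
--         s = s.split("]", 1)[1]
--     # Take the first ~40 chars of words, lowercased + underscore-joined
--     s = s.strip().strip(":").strip()
--     # Drop format placeholders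
--     s = s.replace("%s", "").replace("%d", "").replace("%r", "")
--     s = s.replace("%.2f", "").replace("%.3f", "")
--     # Keep alnum + space; collapse to underscore-joined slug
--     out = []
--     for ch in s.lower():
--         if ch.isalnum():
--             out.append(ch)
--         elif out and out[-1] != "_":
--             out.append("_")
--     slug = "".join(out).strip("_")
--     # Cap length
--     slug = slug[:40].rstrip("_")
--     return slug or fallback
-- ===== SOURCE B (Python) =====
-- def _slugify_for_key(prefix_str: str, fallback: str) -> str:
--     # Strip leading [Tag] if present
--     s = prefix_str.strip()
--     if s.startswith("[") and "]" in s: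
--         s = s[s.index("]") + 1:]
--     s = s.strip().strip(":").strip()
--     # Drop format placeholders
--     for ph in ("%s", "%d", "%r", "%.2f", "%.3f"):
--         s = s.replace(ph, "")
--     # Index scan: collect each maximal alphanumeric run as a token, then join.
--     low = s.lower()
--     tokens = []
--     i, n = 0, len(low)
--     while i < n:
--         if low[i].isalnum():
--             j = i
--             while j < n and low[j].isalnum():
--                 j += 1
--             tokens.append(low[i:j])
--             i = j
--         else:
--             i += 1
--     slug = "_".join(tokens)[:40].rstrip("_")
--     return slug or fallback
-- ===== Notes on version B (the rewrite author's own statement) =====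
-- stated objective: alternative
-- what changed: The bracket tag is cut with index()+slicing instead of split(']',1), the placeholders are removed in a loop over a tuple, and the char-accumulator loop (append char / conditional underscore, then strip('_') and rstrip after the cap) is replaced by a two-level index scan that collects each maximal alphanumeric run of s.lower() as a whole token slice and '_'.join's the tokens, so no leading/trailing underscore handling is needed before the cap.
import Mathlib
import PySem

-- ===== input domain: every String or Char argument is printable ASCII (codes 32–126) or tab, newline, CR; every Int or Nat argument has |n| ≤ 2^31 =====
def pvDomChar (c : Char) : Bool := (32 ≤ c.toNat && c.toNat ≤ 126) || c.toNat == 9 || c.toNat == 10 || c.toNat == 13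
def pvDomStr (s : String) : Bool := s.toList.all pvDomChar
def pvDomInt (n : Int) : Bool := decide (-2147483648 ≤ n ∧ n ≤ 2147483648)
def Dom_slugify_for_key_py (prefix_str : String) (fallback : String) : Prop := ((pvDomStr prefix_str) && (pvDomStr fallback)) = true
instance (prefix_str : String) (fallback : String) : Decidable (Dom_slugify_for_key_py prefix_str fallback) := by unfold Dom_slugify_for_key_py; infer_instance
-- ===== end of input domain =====

-- B cuts the [Tag] by index()+slice, removes placeholders in a loop, and collects each maximal
-- alphanumeric run of s.lower() as a whole token to '_'-join, replacing A's char-accumulator loop;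
-- same return value, alternative objective (no speed claim).

-- ===== PORT A =====
-- body of A's 'for ch in s.lower():' loop; 'out and out[-1] != "_"' read via out[-1] (pyGet? at -1; none = out empty)
def pvStepA (out : List Char) (ch : Char) : List Char :=
  if PySem.Chars.isalnum ch then out ++ [ch]
  else
    match PySem.List.pyGet? out (-1) with
    | some last => if last != '_' then out ++ ['_'] else out
    | none => out

def slugify_for_key_py (prefix_str : String) (fallback : String) : String :=
  let s := PySem.Str.strip prefix_str
  let s := if PySem.Str.startswith s "[" && PySem.Str.isIn "]" s then
             -- s = s.split("]", 1)[1]; under the guard '"]" in s' index 1 exists, the none arm is unreachable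
             match PySem.List.pyGet? ((PySem.Str.splitMax? s "]" 1).getD []) 1 with
             | some t => t
             | none => s
           else s
  let s := PySem.Str.strip (PySem.Str.stripChars (PySem.Str.strip s) ":")
  let s := PySem.Str.replace s "%s" ""
  let s := PySem.Str.replace s "%d" ""
  let s := PySem.Str.replace s "%r" ""
  let s := PySem.Str.replace s "%.2f" ""
  let s := PySem.Str.replace s "%.3f" ""
  let out := ((PySem.Str.lower s).toList).foldl pvStepA []
  let slug := PySem.Chars.stripChars out ['_']
  let slug := PySem.Chars.slice slug none (some 40)
  -- slug.rstrip("_"): rstrip with a chars argument, ported by hand (exact: drop trailing '_')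
  let slug := (slug.reverse.dropWhile (· == '_')).reverse
  if slug.isEmpty then fallback else String.ofList slug

-- ===== PORT B =====
-- Source B's two-level index scan 'while i < n: if low[i].isalnum(): j = i; while …: j += 1; tokens.append(low[i:j]); i = j else: i += 1'
-- as structural recursion: the inner while collecting low[i:j] is the run takeWhile, the outer resumes at j (dropWhile)
def pvRuns : List Char → List (List Char)
  | [] => []
  | c :: cs =>
    if PySem.Chars.isalnum c then
      (c :: cs.takeWhile PySem.Chars.isalnum) :: pvRuns (cs.dropWhile PySem.Chars.isalnum)
    else pvRuns cs
termination_by l => l.length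
decreasing_by
  · have := List.length_dropWhile_le PySem.Chars.isalnum cs; simp; omega
  · simp

def slugify_for_key_py_alt (prefix_str : String) (fallback : String) : String :=
  let s := PySem.Str.strip prefix_str
  let s := if PySem.Str.startswith s "[" && PySem.Str.isIn "]" s then
             -- s = s[s.index("]") + 1:]; under the guard '"]" in s', s.index("]") = s.find("]")
             PySem.Str.slice s (some (PySem.Str.find s "]" + 1)) none
           else s
  let s := PySem.Str.strip (PySem.Str.stripChars (PySem.Str.strip s) ":")
  let s := ["%s", "%d", "%r", "%.2f", "%.3f"].foldl (fun t ph => PySem.Str.replace t ph "") s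
  let toks := pvRuns (PySem.Str.lower s).toList
  let slug := PySem.Chars.slice (PySem.Chars.join ['_'] toks) none (some 40)
  -- .rstrip("_"): rstrip with a chars argument, ported by hand (exact: drop trailing '_')
  let slug := (slug.reverse.dropWhile (· == '_')).reverse
  if slug.isEmpty then fallback else String.ofList slug

-- ===== PRECONDITION & SPEC =====
def Spec_slugify_for_key_py (prefix_str : String) (fallback : String) (out : String) : Prop := out = slugify_for_key_py_alt prefix_str fallback
instance (prefix_str : String) (fallback : String) (out : String) : Decidable (Spec_slugify_for_key_py prefix_str fallback out) := by unfold Spec_slugify_for_key_py; infer_instance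

-- ===== CLAIM (what is proved, stated in full; the proofs are below) =====
def Claim_equal_slugify_for_key_py : Prop := ∀ (prefix_str : String) (fallback : String), Dom_slugify_for_key_py prefix_str fallback → Spec_slugify_for_key_py prefix_str fallback (slugify_for_key_py prefix_str fallback)

-- ===== LEMMAS AND PROOFS =====

-- spec recursion equivalent to A's loop: flag u = "out nonempty and not ending in '_'"
def pvBuild : List Char → Bool → List Char
  | [], _ => []
  | c :: cs, u =>
    if PySem.Chars.isalnum c then c :: pvBuild cs true
    else if u then '_' :: pvBuild cs false
    else pvBuild cs u

def pvFlag (out : List Char) : Bool :=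
  match PySem.List.pyGet? out (-1) with
  | some last => last != '_'
  | none => false

def pvRstripU (l : List Char) : List Char := (l.reverse.dropWhile (· == '_')).reverse

theorem pvCharLe (c d : Char) : (c ≤ d) ↔ c.toNat ≤ d.toNat := Iff.rfl

theorem pvAlnum_ne_und (c : Char) (h : PySem.Chars.isalnum c = true) : (c == '_') = false := by
  revert h
  simp only [PySem.Chars.isalnum, PySem.Chars.isalpha, PySem.Chars.isdigit, PySem.Chars.isupper,
    PySem.Chars.islower, pvCharLe, Bool.or_eq_true, Bool.and_eq_true, decide_eq_true_eq,
    beq_eq_false_iff_ne, ne_eq]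
  show (65 ≤ c.toNat ∧ c.toNat ≤ 90 ∨ 97 ≤ c.toNat ∧ c.toNat ≤ 122) ∨ 48 ≤ c.toNat ∧ c.toNat ≤ 57 → _
  intro h hc
  have : c.toNat = 95 := by subst hc; rfl
  omega

theorem pvFlag_nil : pvFlag [] = false := by decide

theorem pvFlag_append (acc : List Char) (x : Char) : pvFlag (acc ++ [x]) = (x != '_') := by
  unfold pvFlag
  have : PySem.List.pyGet? (acc ++ [x]) (-1) = some x := by
    simp [PySem.List.pyGet?, PySem.List.pyIdx?]
  rw [this]

theorem pvFoldl_stepA (l : List Char) : ∀ acc, l.foldl pvStepA acc = acc ++ pvBuild l (pvFlag acc) := by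
  induction l with
  | nil => intro acc; simp [pvBuild]
  | cons c cs ih =>
    intro acc
    by_cases h : PySem.Chars.isalnum c = true
    · have hstep : pvStepA acc c = acc ++ [c] := by simp [pvStepA, h]
      calc (c :: cs).foldl pvStepA acc = cs.foldl pvStepA (acc ++ [c]) := by simp [List.foldl, hstep]
        _ = (acc ++ [c]) ++ pvBuild cs (pvFlag (acc ++ [c])) := ih _
        _ = acc ++ (c :: pvBuild cs true) := by
              rw [pvFlag_append]
              have := pvAlnum_ne_und c h
              simp only [bne, this, Bool.not_false, List.append_assoc, List.singleton_append]
        _ = acc ++ pvBuild (c :: cs) (pvFlag acc) := by simp [pvBuild, h]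
    · have h' : PySem.Chars.isalnum c = false := by simpa using h
      by_cases hf : pvFlag acc = true
      · have hstep : pvStepA acc c = acc ++ ['_'] := by
          unfold pvFlag at hf
          cases hg : PySem.List.pyGet? acc (-1) with
          | none => rw [hg] at hf; simp at hf
          | some last =>
            rw [hg] at hf; simp at hf
            simp [pvStepA, h', hg, hf]
        calc (c :: cs).foldl pvStepA acc = cs.foldl pvStepA (acc ++ ['_']) := by simp [List.foldl, hstep]
          _ = (acc ++ ['_']) ++ pvBuild cs (pvFlag (acc ++ ['_'])) := ih _
          _ = acc ++ pvBuild (c :: cs) (pvFlag acc) := by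
                rw [pvFlag_append]
                simp [pvBuild, h', hf]
      · have hf' : pvFlag acc = false := by simpa using hf
        have hstep : pvStepA acc c = acc := by
          unfold pvFlag at hf'
          cases hg : PySem.List.pyGet? acc (-1) with
          | none => simp [pvStepA, h', hg]
          | some last =>
            rw [hg] at hf'; simp at hf'
            simp [pvStepA, h', hg, hf']
        calc (c :: cs).foldl pvStepA acc = cs.foldl pvStepA acc := by simp [List.foldl, hstep]
          _ = acc ++ pvBuild cs (pvFlag acc) := ih _
          _ = acc ++ pvBuild (c :: cs) (pvFlag acc) := by simp [pvBuild, h', hf']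

-- once started, a run of alnum chars is copied verbatim
theorem pvBuild_true_run (cs : List Char) :
    pvBuild cs true = cs.takeWhile PySem.Chars.isalnum ++ pvBuild (cs.dropWhile PySem.Chars.isalnum) true := by
  induction cs with
  | nil => simp
  | cons c cs ih =>
    by_cases h : PySem.Chars.isalnum c = true
    · simp [pvBuild, h, List.takeWhile_cons, List.dropWhile_cons, ih]
    · have h' : PySem.Chars.isalnum c = false := by simpa using h
      simp [List.takeWhile_cons, List.dropWhile_cons, h']

theorem pvBuild_false_nil_iff (l : List Char) : pvBuild l false = [] ↔ ∀ c ∈ l, PySem.Chars.isalnum c = false := by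
  induction l with
  | nil => simp [pvBuild]
  | cons c cs ih =>
    by_cases h : PySem.Chars.isalnum c = true
    · simp [pvBuild, h]
    · have h' : PySem.Chars.isalnum c = false := by simpa using h
      simp [pvBuild, h', ih]

theorem pvRuns_nil_iff (l : List Char) : pvRuns l = [] ↔ ∀ c ∈ l, PySem.Chars.isalnum c = false := by
  fun_induction pvRuns l with
  | case1 => simp [pvRuns]
  | case2 c cs h ih => simp [pvRuns, h]
  | case3 c cs h ih =>
    have h' : PySem.Chars.isalnum c = false := by simpa using h
    simp [pvRuns, h', ih]

-- the first emitted char (if any) of pvBuild l false is alphanumeric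
theorem pvBuild_false_head (l : List Char) :
    pvBuild l false = [] ∨ ∃ c t, pvBuild l false = c :: t ∧ PySem.Chars.isalnum c = true := by
  induction l with
  | nil => left; rfl
  | cons c cs ih =>
    by_cases h : PySem.Chars.isalnum c = true
    · right; exact ⟨c, pvBuild cs true, by simp [pvBuild, h], h⟩
    · have h' : PySem.Chars.isalnum c = false := by simpa using h
      simpa [pvBuild, h'] using ih

theorem pvRstripU_append_clean (a b : List Char) (ha : ∀ x ∈ a, (x == '_') = false) :
    pvRstripU (a ++ b) = a ++ pvRstripU b := by
  unfold pvRstripU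
  rw [List.reverse_append, List.dropWhile_append]
  by_cases h : (List.dropWhile (· == '_') b.reverse).isEmpty = true
  · have hr : List.dropWhile (· == '_') a.reverse = a.reverse :=
      List.dropWhile_eq_self_iff.mpr (by
        intro hl
        have hmem : a.reverse[0] ∈ a := by simpa using List.getElem_mem hl
        have hfa := ha _ hmem
        simp at hfa
        simpa using hfa)
    simp only [h, if_pos]
    rw [hr]
    have hb : List.dropWhile (· == '_') b.reverse = [] := by simpa [List.isEmpty_iff] using h
    simp [hb]
  · simp only [h, if_neg, Bool.not_eq_true]
    simp at h
    simp [h]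

theorem pvRstripU_cons_of_ne_nil (x : Char) (b : List Char) (hb : pvRstripU b ≠ []) :
    pvRstripU (x :: b) = x :: pvRstripU b := by
  unfold pvRstripU at *
  have hne : List.dropWhile (· == '_') b.reverse ≠ [] := by
    intro hc; apply hb; rw [hc]; rfl
  have : (x :: b).reverse = b.reverse ++ [x] := by simp
  rw [this, List.dropWhile_append]
  simp [List.isEmpty_iff, hne]

theorem pvRstripU_ne_nil (b : List Char) (c : Char) (hc : c ∈ b) (h : (c == '_') = false) :
    pvRstripU b ≠ [] := by
  unfold pvRstripU
  intro hcon
  have : List.dropWhile (· == '_') b.reverse = [] := by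
    have := congrArg List.reverse hcon; simpa using this
  rw [List.dropWhile_eq_nil_iff] at this
  have := this c (by simpa using hc)
  rw [h] at this; exact Bool.false_ne_true this

theorem pvContains_und (c : Char) : (List.contains ['_'] c) = (c == '_') := by
  rw [List.contains_cons]
  simp

-- stripChars · "_" = rstrip when the head is alphanumeric (or the list is empty)
theorem pvStripU_eq_rstripU (l : List Char)
    (hl : l = [] ∨ ∃ c t, l = c :: t ∧ PySem.Chars.isalnum c = true) :
    PySem.Chars.stripChars l ['_'] = pvRstripU l := by
  unfold PySem.Chars.stripChars pvRstripU
  have hfun : (fun c => List.contains ['_'] c) = (fun c : Char => c == '_') := by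
    funext c; exact pvContains_und c
  rcases hl with rfl | ⟨c, t, rfl, hc⟩
  · simp
  · simp only [hfun]
    rw [List.dropWhile_cons]
    simp [pvAlnum_ne_und c hc]

theorem pvJoin_cons (t : List Char) (ts : List (List Char)) :
    PySem.Chars.join ['_'] (t :: ts) =
      t ++ (if ts = [] then [] else '_' :: PySem.Chars.join ['_'] ts) := by
  cases ts with
  | nil => simp [PySem.Chars.join, List.intercalate]
  | cons u us => simp [PySem.Chars.join, List.intercalate, List.intersperse]

-- head of dropWhile fails the predicate
theorem pvDropWhile_head_false {p : Char → Bool} (l : List Char) (c : Char) (t : List Char)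
    (h : l.dropWhile p = c :: t) : p c = false := by
  induction l with
  | nil => simp at h
  | cons x xs ih =>
    rw [List.dropWhile_cons] at h
    by_cases hx : p x = true
    · rw [if_pos hx] at h; exact ih h
    · have hx' : p x = false := by simpa using hx
      rw [hx', if_neg (by simp)] at h
      cases h; exact hx'

-- the core: A's stripped accumulator equals the '_'-join of B's alphanumeric runs
theorem pvCoreAux : ∀ (n : Nat) (l : List Char), l.length ≤ n →
    PySem.Chars.stripChars (pvBuild l false) ['_'] = PySem.Chars.join ['_'] (pvRuns l) := by
  intro n
  induction n with
  | zero =>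
    intro l hl
    have : l = [] := List.length_eq_zero_iff.mp (Nat.le_zero.mp hl)
    subst this
    simp [pvBuild, pvRuns, PySem.Chars.stripChars, PySem.Chars.join, List.intercalate]
  | succ n ih =>
    intro l hl
    cases l with
    | nil => simp [pvBuild, pvRuns, PySem.Chars.stripChars, PySem.Chars.join, List.intercalate]
    | cons c cs =>
      by_cases h : PySem.Chars.isalnum c = true
      · -- a token starts here
        set t := cs.takeWhile PySem.Chars.isalnum with ht
        set r := cs.dropWhile PySem.Chars.isalnum with hr
        have hbuild : pvBuild (c :: cs) false = (c :: t) ++ pvBuild r true := by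
          rw [show pvBuild (c :: cs) false = c :: pvBuild cs true from by simp [pvBuild, h]]
          rw [pvBuild_true_run cs, ← ht, ← hr]
          simp
        have htoks : pvRuns (c :: cs) = (c :: t) :: pvRuns r := by
          rw [pvRuns]; simp [h]
          exact ⟨ht.symm, by rw [← hr]⟩
        have hclean : ∀ x ∈ c :: t, (x == '_') = false := by
          intro x hx
          rcases List.mem_cons.mp hx with rfl | hx'
          · exact pvAlnum_ne_und x h
          · exact pvAlnum_ne_und x (List.mem_takeWhile_imp hx')
        have hhead : pvBuild (c :: cs) false = [] ∨
            ∃ d u, pvBuild (c :: cs) false = d :: u ∧ PySem.Chars.isalnum d = true := pvBuild_false_head _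
        rw [pvStripU_eq_rstripU _ hhead, hbuild, htoks, pvJoin_cons,
            pvRstripU_append_clean _ _ hclean]
        congr 1
        -- remaining: pvRstripU (pvBuild r true) = if pvRuns r = [] then [] else '_' :: join (pvRuns r)
        have hrlen : r.length ≤ cs.length := List.length_dropWhile_le _ _
        cases hrc : r with
        | nil => simp [pvBuild, pvRuns, pvRstripU]
        | cons d r' =>
          have hd : PySem.Chars.isalnum d = false := pvDropWhile_head_false cs d r' (hr ▸ hrc ▸ rfl)
          have hb : pvBuild (d :: r') true = '_' :: pvBuild r' false := by
            simp [pvBuild, hd]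
          have htr : pvRuns (d :: r') = pvRuns r' := by rw [pvRuns]; simp [hd]
          have hlen' : r'.length ≤ n := by
            have : (d :: r').length ≤ cs.length := hrc ▸ hrlen
            simp at this hl; omega
          have ihr : PySem.Chars.stripChars (pvBuild r' false) ['_'] = PySem.Chars.join ['_'] (pvRuns r') :=
            ih r' hlen'
          have hhead' := pvBuild_false_head r'
          have hstrip' : pvRstripU (pvBuild r' false) = PySem.Chars.join ['_'] (pvRuns r') := by
            rw [← pvStripU_eq_rstripU _ hhead', ihr]
          rw [hb, htr]
          by_cases hnil : pvBuild r' false = []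
          · have : pvRuns r' = [] := (pvRuns_nil_iff r').mpr ((pvBuild_false_nil_iff r').mp hnil)
            rw [hnil, this]
            simp [pvRstripU]
          · have : pvRuns r' ≠ [] := by
              intro hc
              exact hnil ((pvBuild_false_nil_iff r').mpr ((pvRuns_nil_iff r').mp hc))
            rcases hhead' with hA | ⟨e, u, he, halnum⟩
            · exact absurd hA hnil
            · have hne : pvRstripU (pvBuild r' false) ≠ [] :=
                pvRstripU_ne_nil _ e (he ▸ List.mem_cons_self ..) (pvAlnum_ne_und e halnum)
              rw [pvRstripU_cons_of_ne_nil _ _ hne, hstrip', if_neg this]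
      · have h' : PySem.Chars.isalnum c = false := by simpa using h
        have hb : pvBuild (c :: cs) false = pvBuild cs false := by simp [pvBuild, h']
        have ht : pvRuns (c :: cs) = pvRuns cs := by rw [pvRuns]; simp [h']
        rw [hb, ht]
        exact ih cs (by simp at hl; omega)

theorem pvCore (l : List Char) :
    PySem.Chars.stripChars (l.foldl pvStepA []) ['_'] = PySem.Chars.join ['_'] (pvRuns l) := by
  rw [pvFoldl_stepA l [], pvFlag_nil]
  simp only [List.nil_append]
  exact pvCoreAux l.length l (le_refl _)

-- ===== bracket step: split("]",1)[1] = s[find+1:] when "]" occurs =====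

-- after the separator is consumed (m = 0), go returns the rest as the final piece
theorem pvGoZero (fuel : Nat) (l cur : List Char) (acc : List (List Char)) :
    PySem.Chars.splitOnMax.go [']'] fuel 0 l cur acc = ((cur.reverse ++ l) :: acc).reverse := by
  cases fuel with
  | zero => rfl
  | succ f =>
    cases l with
    | nil => simp [PySem.Chars.splitOnMax.go]
    | cons c rest => simp [PySem.Chars.splitOnMax.go]

theorem pvGoOne (l : List Char) : ∀ (fuel : Nat) (cur : List Char) (acc : List (List Char)),
    ']' ∈ l → l.length ≤ fuel →
    PySem.Chars.splitOnMax.go [']'] fuel 1 l cur acc =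
      acc.reverse ++ [cur.reverse ++ l.takeWhile (· != ']'), (l.dropWhile (· != ']')).tail] := by
  induction l with
  | nil => intro fuel cur acc hmem _; simp at hmem
  | cons c rest ih =>
    intro fuel cur acc hmem hlen
    cases fuel with
    | zero => simp at hlen
    | succ f =>
      by_cases hc : c = ']'
      · subst hc
        rw [show PySem.Chars.splitOnMax.go [']'] (f + 1) 1 (']' :: rest) cur acc
              = PySem.Chars.splitOnMax.go [']'] f 0 (List.drop 1 (']' :: rest)) [] (cur.reverse :: acc) from by
          simp [PySem.Chars.splitOnMax.go, List.isPrefixOf]]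
        rw [List.drop_one, pvGoZero]
        simp [List.takeWhile_cons, List.dropWhile_cons]
      · have hmem' : ']' ∈ rest := by
          rcases List.mem_cons.mp hmem with h | h
          · exact absurd h.symm hc
          · exact h
        rw [show PySem.Chars.splitOnMax.go [']'] (f + 1) 1 (c :: rest) cur acc
              = PySem.Chars.splitOnMax.go [']'] f 1 rest (c :: cur) acc from by
          simp [PySem.Chars.splitOnMax.go, List.isPrefixOf, Ne.symm hc]]
        rw [ih f (c :: cur) acc hmem' (by simp at hlen; omega)]
        simp [List.takeWhile_cons, List.dropWhile_cons, hc]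

theorem pvFindGo (l : List Char) : ∀ (k : Nat), ']' ∈ l →
    PySem.Chars.find.go [']'] l k = (k : Int) + (l.takeWhile (· != ']')).length := by
  induction l with
  | nil => intro k hmem; simp at hmem
  | cons c rest ih =>
    intro k hmem
    by_cases hc : c = ']'
    · subst hc
      rw [show PySem.Chars.find.go [']'] (']' :: rest) k = (k : Int) from by
        simp [PySem.Chars.find.go, List.isPrefixOf]]
      simp [List.takeWhile_cons]
    · have hmem' : ']' ∈ rest := by
        rcases List.mem_cons.mp hmem with h | h
        · exact absurd h.symm hc
        · exact h
      rw [show PySem.Chars.find.go [']'] (c :: rest) k = PySem.Chars.find.go [']'] rest (k + 1) from by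
        simp [PySem.Chars.find.go, List.isPrefixOf, Ne.symm hc]]
      rw [ih (k + 1) hmem']
      simp [List.takeWhile_cons, hc]
      push_cast
      ring

theorem pvFind_eq (l : List Char) (hmem : ']' ∈ l) :
    PySem.Chars.find l [']'] = ((l.takeWhile (· != ']')).length : Int) := by
  unfold PySem.Chars.find
  rw [pvFindGo l 0 hmem]
  simp

theorem pvDrop_succ_take (l : List Char) :
    l.drop ((l.takeWhile (· != ']')).length + 1) = (l.dropWhile (· != ']')).tail := by
  have h := List.takeWhile_append_dropWhile (p := (· != ']')) (l := l)
  have h2 : l.drop ((l.takeWhile (· != ']')).length + 1)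
      = (l.takeWhile (· != ']') ++ l.dropWhile (· != ']')).drop ((l.takeWhile (· != ']')).length + 1) := by
    rw [h]
  rw [h2, List.drop_length_add_append]
  exact List.drop_one

-- A's bracket expression equals B's, under the guard
theorem pvBracket_eq (s : String) (hin : PySem.Str.isIn "]" s = true) :
    (match PySem.List.pyGet? ((PySem.Str.splitMax? s "]" 1).getD []) 1 with
     | some t => t
     | none => s) = PySem.Str.slice s (some (PySem.Str.find s "]" + 1)) none := by
  have hmem : ']' ∈ s.toList := by
    have := (PySem.Str.isIn_iff_infix (sub := "]") (s := s)).mp hin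
    have hsub : ("]" : String).toList = [']'] := rfl
    rw [hsub] at this
    rcases this with ⟨p, q, hpq⟩
    exact hpq ▸ (by simp)
  -- left side
  have hsplit : PySem.Str.splitMax? s "]" 1 =
      some [String.ofList (s.toList.takeWhile (· != ']')),
            String.ofList ((s.toList.dropWhile (· != ']')).tail)] := by
    unfold PySem.Str.splitMax? PySem.Chars.splitMax?
    have hsep : ("]" : String).toList = [']'] := rfl
    rw [hsep]
    rw [if_neg (by simp)]
    unfold PySem.Chars.splitOnMax
    rw [if_neg (by omega)]
    simp only [Int.toNat_one]
    rw [pvGoOne s.toList (s.toList.length + 1) [] [] hmem (by omega)]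
    simp
  rw [hsplit]
  have hget : PySem.List.pyGet?
      [String.ofList (s.toList.takeWhile (· != ']')),
       String.ofList ((s.toList.dropWhile (· != ']')).tail)] 1
      = some (String.ofList ((s.toList.dropWhile (· != ']')).tail)) := by
    simp [PySem.List.pyGet?, PySem.List.pyIdx?]
  simp only [Option.getD_some, hget]
  -- right side
  have hfind : PySem.Str.find s "]" = ((s.toList.takeWhile (· != ']')).length : Int) := by
    have : PySem.Str.find s "]" = PySem.Chars.find s.toList [']'] := by
      simp [PySem.Str.find]
    rw [this, pvFind_eq s.toList hmem]
  apply String.toList_injective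
  rw [show (PySem.Str.slice s (some (PySem.Str.find s "]" + 1)) none).toList
        = PySem.List.slice s.toList (some (PySem.Str.find s "]" + 1)) none from by
    simp [PySem.Str.slice]]
  rw [hfind]
  rw [PySem.List.slice_from s.toList (by positivity)]
  rw [show (((s.toList.takeWhile (· != ']')).length : Int) + 1).toNat
        = (s.toList.takeWhile (· != ']')).length + 1 from by omega]
  rw [pvDrop_succ_take]
  simp

-- the common pipeline after the bracket step agrees
theorem pvRest_eq (s fallback : String) :
    (let t := PySem.Str.strip (PySem.Str.stripChars (PySem.Str.strip s) ":")
     let t := PySem.Str.replace t "%s" ""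
     let t := PySem.Str.replace t "%d" ""
     let t := PySem.Str.replace t "%r" ""
     let t := PySem.Str.replace t "%.2f" ""
     let t := PySem.Str.replace t "%.3f" ""
     let out := ((PySem.Str.lower t).toList).foldl pvStepA []
     let slug := PySem.Chars.stripChars out ['_']
     let slug := PySem.Chars.slice slug none (some 40)
     let slug := (slug.reverse.dropWhile (· == '_')).reverse
     if slug.isEmpty then fallback else String.ofList slug)
    =
    (let t := PySem.Str.strip (PySem.Str.stripChars (PySem.Str.strip s) ":")
     let t := ["%s", "%d", "%r", "%.2f", "%.3f"].foldl (fun u ph => PySem.Str.replace u ph "") t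
     let toks := pvRuns (PySem.Str.lower t).toList
     let slug := PySem.Chars.slice (PySem.Chars.join ['_'] toks) none (some 40)
     let slug := (slug.reverse.dropWhile (· == '_')).reverse
     if slug.isEmpty then fallback else String.ofList slug) := by
  simp only [List.foldl]
  rw [pvCore]

-- ===== VERDICT (by name: the statement is the Claim_ definition above) =====
theorem slugify_for_key_py_spec : Claim_equal_slugify_for_key_py := by
  intro prefix_str fallback _
  unfold Spec_slugify_for_key_py slugify_for_key_py slugify_for_key_py_alt
  simp only
  by_cases hg : (PySem.Str.startswith (PySem.Str.strip prefix_str) "[" &&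
      PySem.Str.isIn "]" (PySem.Str.strip prefix_str)) = true
  · rw [if_pos hg, if_pos hg, pvBracket_eq _ (by exact (Bool.and_eq_true ..).mp hg |>.2)]
    exact pvRest_eq _ fallback
  · rw [if_neg hg, if_neg hg]
    exact pvRest_eq _ fallback
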